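-- pv_equiv track=rewrite | github.com/simplyblock/sbcli | tests/perf/run_perf_test.py | extract_fio_essentials
-- ===== SOURCE A (Python) =====
-- def extract_fio_essentials(output):
--     lines = output.splitlines()
--     capture = []
--     recording = False
--
--     for line in lines:
--         if "1.00th=" in line:
--             recording = True
--         if recording:
--             capture.append(line)
--         if "iops" in line:
--             break
--
--     return "\n".join(capture)
-- ===== SOURCE B (Python) =====
-- def extract_fio_essentials(output):
--     lines = output.splitlines()
--     stop = next((i for i, line in enumerate(lines) if "iops" in line), len(lines) - 1)
--     prefix = lines[:stop + 1]
--     start = next((i for i, line in enumerate(prefix) if "1.00th=" in line), None)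
--     if start is None:
--         return ""
--     return "\n".join(prefix[start:])
-- ===== Notes on version B (the rewrite author's own statement) =====
-- stated objective: alternative
-- what changed: Replaces A's single-pass recording-flag state machine with three steps: truncate the line list at the first line containing the stop marker, find the first start-marker line in that prefix, and join the slice from there.
import Mathlib
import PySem

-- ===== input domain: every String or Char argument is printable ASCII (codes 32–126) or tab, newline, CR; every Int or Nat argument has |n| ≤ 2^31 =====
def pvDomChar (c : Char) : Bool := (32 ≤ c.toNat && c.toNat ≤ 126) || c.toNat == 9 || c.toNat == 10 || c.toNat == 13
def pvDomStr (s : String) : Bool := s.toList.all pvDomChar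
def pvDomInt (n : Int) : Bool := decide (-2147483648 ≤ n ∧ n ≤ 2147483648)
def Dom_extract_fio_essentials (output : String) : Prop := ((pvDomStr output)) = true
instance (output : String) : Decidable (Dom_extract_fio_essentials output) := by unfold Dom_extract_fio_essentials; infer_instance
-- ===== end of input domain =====

-- B replaces A's one-pass recording-flag state machine by truncate-at-first-"iops",
-- locate-first-"1.00th=" in the prefix, and slice from there (objective: alternative decomposition).

-- ===== PORT A =====
-- A's for-loop with its `recording` flag, `capture` accumulator and `break`.
def pvLoopA : List String → Bool → List String → List String
  | [], _, capture => capture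
  | line :: rest, recording, capture =>
    let recording' := if PySem.Str.isIn "1.00th=" line then true else recording
    let capture' := if recording' then capture ++ [line] else capture
    if PySem.Str.isIn "iops" line then capture'
    else pvLoopA rest recording' capture'

def extract_fio_essentials (output : String) : String :=
  PySem.Str.join "\n" (pvLoopA (PySem.Str.splitlines output) false [])

-- ===== PORT B =====
def extract_fio_essentials_alt (output : String) : String :=
  let lines := PySem.Str.splitlines output
  let stop : Nat :=
    match lines.findIdx? (fun line => PySem.Str.isIn "iops" line) with
    | some i => i
    | none => lines.length - 1
  let pre := lines.take (stop + 1)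
  match pre.findIdx? (fun line => PySem.Str.isIn "1.00th=" line) with
  | none => ""
  | some j => PySem.Str.join "\n" (pre.drop j)

-- ===== PRECONDITION & SPEC =====
def Spec_extract_fio_essentials (output : String) (out : String) : Prop := out = extract_fio_essentials_alt output
instance (output : String) (out : String) : Decidable (Spec_extract_fio_essentials output out) := by unfold Spec_extract_fio_essentials; infer_instance

-- ===== CLAIM (what is proved, stated in full; the proofs are below) =====
def Claim_equal_extract_fio_essentials : Prop := ∀ (output : String), Dom_extract_fio_essentials output → Spec_extract_fio_essentials output (extract_fio_essentials output)

-- ===== LEMMAS AND PROOFS =====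

-- the two marker tests
def pvPS (l : String) : Bool := PySem.Str.isIn "1.00th=" l
def pvPI (l : String) : Bool := PySem.Str.isIn "iops" l

-- B's stop index and list-level result
def pvStop (ls : List String) : Nat :=
  match ls.findIdx? pvPI with
  | some i => i
  | none => ls.length - 1

def pvB (ls : List String) : List String :=
  match (ls.take (pvStop ls + 1)).findIdx? pvPS with
  | none => []
  | some j => (ls.take (pvStop ls + 1)).drop j

theorem pvTakeLenSub (ls : List String) : ls.take (ls.length - 1 + 1) = ls := by
  cases ls <;> simp

-- the truncated prefix unfolds at a non-"iops" head
theorem pvPreCons (l : String) (ls : List String) (h : pvPI l = false) :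
    (l :: ls).take (pvStop (l :: ls) + 1) = l :: ls.take (pvStop ls + 1) := by
  unfold pvStop
  rw [List.findIdx?_cons, h]
  cases hf : ls.findIdx? pvPI with
  | none => simp [pvTakeLenSub]
  | some i => simp

-- at an "iops" head the truncated prefix is just that head
theorem pvPreIops (l : String) (ls : List String) (h : pvPI l = true) :
    (l :: ls).take (pvStop (l :: ls) + 1) = [l] := by
  unfold pvStop
  rw [List.findIdx?_cons, h]
  simp

-- once recording, A keeps every line up to and including the first "iops" line
theorem pvLoopA_true (ls : List String) : ∀ cap,
    pvLoopA ls true cap = cap ++ ls.take (pvStop ls + 1) := by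
  induction ls with
  | nil => intro cap; simp [pvLoopA]
  | cons l ls ih =>
    intro cap
    simp only [pvLoopA]
    by_cases h : pvPI l = true
    · rw [show PySem.Str.isIn "iops" l = true from h, pvPreIops l ls h]
      simp
    · have h' : pvPI l = false := by simpa using h
      rw [show PySem.Str.isIn "iops" l = false from h', pvPreCons l ls h']
      simp [ih]

-- A's full loop equals B's truncate-then-locate-then-slice
theorem pvLoopA_eq_pvB (ls : List String) : pvLoopA ls false [] = pvB ls := by
  induction ls with
  | nil => simp [pvLoopA, pvB]
  | cons l ls ih =>
    simp only [pvLoopA]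
    by_cases hs : pvPS l = true
    · rw [show PySem.Str.isIn "1.00th=" l = true from hs]
      by_cases hi : pvPI l = true
      · rw [show PySem.Str.isIn "iops" l = true from hi]
        unfold pvB
        rw [pvPreIops l ls hi, List.findIdx?_cons, hs]
        simp
      · have hi' : pvPI l = false := by simpa using hi
        rw [show PySem.Str.isIn "iops" l = false from hi']
        unfold pvB
        rw [pvPreCons l ls hi', List.findIdx?_cons, hs]
        simp [pvLoopA_true]
    · have hs' : pvPS l = false := by simpa using hs
      rw [show PySem.Str.isIn "1.00th=" l = false from hs']
      by_cases hi : pvPI l = true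
      · rw [show PySem.Str.isIn "iops" l = true from hi]
        unfold pvB
        rw [pvPreIops l ls hi, List.findIdx?_cons, hs']
        simp
      · have hi' : pvPI l = false := by simpa using hi
        rw [show PySem.Str.isIn "iops" l = false from hi']
        simp only [Bool.false_eq_true, if_false, ih]
        unfold pvB
        rw [pvPreCons l ls hi', List.findIdx?_cons, hs']
        cases (ls.take (pvStop ls + 1)).findIdx? pvPS with
        | none => simp
        | some j => simp

-- B's port computes join of pvB
theorem pvJoinMatch (pre : List String) :
    (match pre.findIdx? pvPS with
     | none => ""
     | some j => PySem.Str.join "\n" (pre.drop j)) =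
    PySem.Str.join "\n" (match pre.findIdx? pvPS with
     | none => []
     | some j => pre.drop j) := by
  cases pre.findIdx? pvPS with
  | none => rfl
  | some j => rfl

theorem pvAlt_eq (output : String) :
    extract_fio_essentials_alt output = PySem.Str.join "\n" (pvB (PySem.Str.splitlines output)) := by
  unfold extract_fio_essentials_alt pvB pvStop
  exact pvJoinMatch _

-- ===== VERDICT (by name: the statement is the Claim_ definition above) =====
theorem extract_fio_essentials_spec : Claim_equal_extract_fio_essentials := by
  intro output _
  unfold Spec_extract_fio_essentials extract_fio_essentials
  rw [pvAlt_eq, pvLoopA_eq_pvB]
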